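-- pv_equiv track=rewrite | github.com/fjcastellanos/domain_adaptation_staff_retrieval | parser.py | nameOfDirFromPath
-- ===== SOURCE A (Python) =====
-- def nameOfDirFromPath(path_file):
--     assert type(path_file) == str
--     splits = path_file.split('/')
--
--     dir_path = ''
--     is_full_path = False
--     for split in splits:
--         if ".." in split:
--             dir_path = ".."
--         else:
--             if "." not in split:
--                 if dir_path == '':
--                     if (is_full_path):
--                         dir_path = dir_path + "/" + split
--                     else:
--                         dir_path = split
--                         is_full_path = True
--                 else:
--                     dir_path = dir_path + "/" + split
--
--     return dir_path
-- ===== SOURCE B (Python) =====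
-- def nameOfDirFromPath(path_file):
--     assert type(path_file) == str
--     splits = path_file.split('/')
--     kept = []
--     for seg in reversed(splits):
--         if ".." in seg:
--             kept.append("..")
--             break
--         if "." not in seg:
--             kept.append(seg)
--     return "/".join(reversed(kept))
-- ===== Notes on version B (the rewrite author's own statement) =====
-- stated objective: simpler
-- what changed: B scans the split segments backwards, stopping at the last '..'-containing segment and collecting the '.'-free segments after it, then joins once with '/'; A instead folds forward over a growing string plus an is_full_path flag with incremental concatenation.
import Mathlib
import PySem

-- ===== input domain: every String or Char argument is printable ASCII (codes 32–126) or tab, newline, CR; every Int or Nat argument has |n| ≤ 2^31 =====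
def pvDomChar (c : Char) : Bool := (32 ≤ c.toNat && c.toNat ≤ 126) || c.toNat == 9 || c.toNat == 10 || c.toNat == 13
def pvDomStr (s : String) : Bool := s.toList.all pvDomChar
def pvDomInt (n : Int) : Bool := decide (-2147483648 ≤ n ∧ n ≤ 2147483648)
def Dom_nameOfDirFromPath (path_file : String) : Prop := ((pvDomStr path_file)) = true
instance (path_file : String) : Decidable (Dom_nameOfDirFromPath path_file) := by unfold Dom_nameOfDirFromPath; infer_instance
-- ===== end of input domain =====

-- B rebuilds the kept segments back-to-front (reverse scan stopping at the last '..'-segment)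
-- and joins once, instead of A's forward fold over a (string, flag) accumulator; objective: simpler.

-- ===== PORT A =====
-- A's loop body: state = (dir_path as List Char, is_full_path)
def pvStepA (st : List Char × Bool) (seg : List Char) : List Char × Bool :=
  if PySem.Chars.isIn ['.', '.'] seg then (['.', '.'], st.2)
  else if PySem.Chars.isIn ['.'] seg = false then
    (if st.1 = [] then
      (if st.2 then (st.1 ++ ['/'] ++ seg, st.2) else (seg, true))
    else (st.1 ++ ['/'] ++ seg, st.2))
  else st

def nameOfDirFromPath (path_file : String) : String :=
  let splits := PySem.Chars.splitOn path_file.toList ['/']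
  String.ofList (splits.foldl pvStepA ([], false)).1

-- ===== PORT B =====
-- B's reverse scan: over the reversed segment list, stop at the first '..'-segment,
-- collect '.'-free segments; result already in original order ('reversed(kept)').
def pvCollectB : List (List Char) → List (List Char)
  | [] => []
  | seg :: rest =>
    if PySem.Chars.isIn ['.', '.'] seg then [['.', '.']]
    else if PySem.Chars.isIn ['.'] seg then pvCollectB rest
    else pvCollectB rest ++ [seg]

def nameOfDirFromPath_alt (path_file : String) : String :=
  let splits := PySem.Chars.splitOn path_file.toList ['/']
  String.ofList (PySem.Chars.join ['/'] (pvCollectB splits.reverse))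

-- ===== PRECONDITION & SPEC =====
def Spec_nameOfDirFromPath (path_file : String) (out : String) : Prop := out = nameOfDirFromPath_alt path_file
instance (path_file : String) (out : String) : Decidable (Spec_nameOfDirFromPath path_file out) := by unfold Spec_nameOfDirFromPath; infer_instance

-- ===== CLAIM (what is proved, stated in full; the proofs are below) =====
def Claim_equal_nameOfDirFromPath : Prop := ∀ (path_file : String), Dom_nameOfDirFromPath path_file → Spec_nameOfDirFromPath path_file (nameOfDirFromPath path_file)

-- ===== LEMMAS AND PROOFS =====

-- abstract "kept segment list" that A's fold maintains implicitly
def pvK (k : List (List Char)) (seg : List Char) : List (List Char) :=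
  if PySem.Chars.isIn ['.', '.'] seg then [['.', '.']]
  else if PySem.Chars.isIn ['.'] seg then k
  else k ++ [seg]

theorem pvJoin_append_singleton (k : List (List Char)) (y : List Char) (hk : k ≠ []) :
    PySem.Chars.join ['/'] (k ++ [y]) = PySem.Chars.join ['/'] k ++ ['/'] ++ y := by
  induction k with
  | nil => exact absurd rfl hk
  | cons a t ih =>
    cases t with
    | nil => simp [PySem.Chars.join_cons_cons, PySem.Chars.join_singleton]
    | cons b t' =>
      have := ih (by simp)
      simp only [List.cons_append, PySem.Chars.join_cons_cons] at this ⊢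
      simp [this]

-- invariant: A's fold state is (join of kept, flag), with the flag meaningful only when the join is empty
theorem pvMainA (l : List (List Char)) :
    ∀ (k : List (List Char)) (b : Bool),
      (PySem.Chars.join ['/'] k ≠ [] ∨ (k = [] ∧ b = false) ∨ (k = [[]] ∧ b = true)) →
      (l.foldl pvStepA (PySem.Chars.join ['/'] k, b)).1 = PySem.Chars.join ['/'] (l.foldl pvK k) := by
  induction l with
  | nil => intro k b _; rfl
  | cons seg rest ih =>
    intro k b hyp
    simp only [List.foldl_cons]
    by_cases hdd : PySem.Chars.isIn ['.', '.'] seg = true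
    · have hst : pvStepA (PySem.Chars.join ['/'] k, b) seg
          = (PySem.Chars.join ['/'] [['.', '.']], b) := by
        simp [pvStepA, hdd, PySem.Chars.join_singleton]
      have hk : pvK k seg = [['.', '.']] := by simp [pvK, hdd]
      rw [hst, hk, ih _ _ (Or.inl (by simp [PySem.Chars.join_singleton]))]
    · by_cases hd : PySem.Chars.isIn ['.'] seg = true
      · have hst : pvStepA (PySem.Chars.join ['/'] k, b) seg = (PySem.Chars.join ['/'] k, b) := by
          simp [pvStepA, hdd, hd]
        have hk : pvK k seg = k := by simp [pvK, hdd, hd]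
        rw [hst, hk, ih _ _ hyp]
      · -- accepted segment
        have hk : pvK k seg = k ++ [seg] := by simp [pvK, hdd, hd]
        by_cases hje : PySem.Chars.join ['/'] k = []
        · rcases hyp with hne | ⟨hke, hbe⟩ | ⟨hke, hbe⟩
          · exact absurd hje hne
          · subst hke hbe
            have hst : pvStepA (PySem.Chars.join ['/'] ([] : List (List Char)), false) seg
                = (PySem.Chars.join ['/'] [seg], true) := by
              simp [pvStepA, hdd, hd, PySem.Chars.join_nil, PySem.Chars.join_singleton]
            rw [hst, hk]
            by_cases hs : seg = []
            · subst hs; exact ih _ _ (Or.inr (Or.inr ⟨rfl, rfl⟩))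
            · exact ih _ _ (Or.inl (by simpa [PySem.Chars.join_singleton] using hs))
          · subst hke hbe
            have hst : pvStepA (PySem.Chars.join ['/'] [([] : List Char)], true) seg
                = (PySem.Chars.join ['/'] ([[]] ++ [seg]), true) := by
              simp [pvStepA, hdd, hd, PySem.Chars.join_singleton,
                PySem.Chars.join_cons_cons]
            rw [hst, hk]
            exact ih _ _ (Or.inl (by
              simp [PySem.Chars.join_cons_cons, PySem.Chars.join_singleton]))
        · have hkne : k ≠ [] := by
            intro h; subst h; exact hje (PySem.Chars.join_nil _)
          have hst : pvStepA (PySem.Chars.join ['/'] k, b) seg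
              = (PySem.Chars.join ['/'] (k ++ [seg]), b) := by
            simp [pvStepA, hdd, hd, hje, pvJoin_append_singleton k seg hkne]
          rw [hst, hk]
          refine ih _ _ (Or.inl ?_)
          rw [pvJoin_append_singleton k seg hkne]
          intro h
          exact hje (by simpa using List.append_eq_nil_iff.mp ((List.append_eq_nil_iff.mp h).1) |>.1)

-- B's reverse scan computes the same kept list as a forward fold of pvK
theorem pvCollectB_reverse (l : List (List Char)) :
    pvCollectB l.reverse = l.foldl pvK [] := by
  induction l using List.reverseRecOn with
  | nil => rfl
  | append_singleton t x ih =>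
    rw [List.reverse_append, List.foldl_append]
    simp only [List.reverse_singleton, List.singleton_append, List.foldl_cons, List.foldl_nil]
    by_cases hdd : PySem.Chars.isIn ['.', '.'] x = true
    · simp [pvCollectB, pvK, hdd]
    · by_cases hd : PySem.Chars.isIn ['.'] x = true
      · simp [pvCollectB, pvK, hdd, hd, ih]
      · simp [pvCollectB, pvK, hdd, hd, ih]

-- ===== VERDICT (by name: the statement is the Claim_ definition above) =====
theorem nameOfDirFromPath_spec : Claim_equal_nameOfDirFromPath := by
  intro path_file _
  unfold Spec_nameOfDirFromPath nameOfDirFromPath nameOfDirFromPath_alt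
  have h := pvMainA (PySem.Chars.splitOn path_file.toList ['/']) [] false
    (Or.inr (Or.inl ⟨rfl, rfl⟩))
  simp only [PySem.Chars.join_nil] at h
  simp only []
  rw [h, pvCollectB_reverse]
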